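-- pv_equiv track=rewrite | github.com/theApsil/TBank-Internship | task7.py | solve
-- ===== SOURCE A (Python) =====
-- def solve(n, k, a):
--     MOD = 998244353
--
--     S = [0] * (k + 1)
--     S[0] = n % MOD
--
--     pow_a = [1] * n
--     for m in range(1, k + 1):
--         total = 0
--         for i in range(n):
--             pow_a[i] = (pow_a[i] * a[i]) % MOD
--             total = (total + pow_a[i]) % MOD
--         S[m] = total
--
--     max_p = k
--     fact = [1] * (max_p + 1)
--     inv_fact = [1] * (max_p + 1)
--     for i in range(1, max_p + 1):
--         fact[i] = fact[i-1] * i % MOD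
--
--     inv_fact[max_p] = pow(fact[max_p], MOD-2, MOD)
--     for i in reversed(range(max_p)):
--         inv_fact[i] = inv_fact[i+1] * (i+1) % MOD
--
--     def comb(p, m):
--         if m < 0 or m > p:
--             return 0
--         return fact[p] * inv_fact[m] % MOD * inv_fact[p-m] % MOD
--
--     pow2 = [1] * (k + 1)
--     for i in range(1, k + 1):
--         pow2[i] = (pow2[i-1] * 2) % MOD
--     inv2 = (MOD + 1) // 2
--
--     results = []
--     for p in range(1, k + 1):
--         sum_binom = 0
--         for m in range(p + 1):
--             val = comb(p, m) * S[m] % MOD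
--             val = val * S[p - m] % MOD
--             sum_binom = (sum_binom + val) % MOD
--
--         sum_single = (pow2[p] * S[p]) % MOD
--         total = (sum_binom - sum_single) % MOD
--         ans = (total * inv2) % MOD
--
--         results.append(ans)
--
--     return results
-- ===== SOURCE B (Python) =====
-- def padd(f, g):
--     out = []
--     for i in range(max(len(f), len(g))):
--         x = f[i] if i < len(f) else 0
--         y = g[i] if i < len(g) else 0
--         out.append(x + y)
--     return out
--
--
-- def psub(f, g):
--     return padd(f, [-y for y in g])
--
--
-- def karat(f, g):
--     # Karatsuba polynomial product over the integers
--     if len(f) <= 1: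
--         c = f[0] if f else 0
--         return [c * x for x in g]
--     h = len(f) // 2
--     f0, f1 = f[:h], f[h:]
--     g0, g1 = g[:h], g[h:]
--     p0 = karat(f0, g0)
--     p2 = karat(f1, g1)
--     pm = karat(padd(f0, f1), padd(g0, g1))
--     mid = psub(psub(pm, p0), p2)
--     return padd(p0, padd([0] * h + mid, [0] * (2 * h) + p2))
--
--
-- def solve(n, k, a):
--     MOD = 998244353
--     INV2 = (MOD + 1) // 2
--
--     # power sums, transposed: per-element geometric accumulation
--     S = [n % MOD] + [0] * k
--     for i in range(n):
--         t = 1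
--         for m in range(1, k + 1):
--             t = t * a[i] % MOD
--             S[m] = (S[m] + t) % MOD
--
--     fact = [1] * (k + 1)
--     for i in range(1, k + 1):
--         fact[i] = fact[i - 1] * i % MOD
--     inv_fact = [1] * (k + 1)
--     inv_fact[k] = pow(fact[k], MOD - 2, MOD)
--     for i in reversed(range(k)):
--         inv_fact[i] = inv_fact[i + 1] * (i + 1) % MOD
--
--     # EGF of the power sums; one subquadratic Karatsuba squaring replaces
--     # the per-p binomial convolutions
--     f = [S[m] * inv_fact[m] % MOD for m in range(k + 1)]
--     c = karat(f, f)
--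
--     res = []
--     pw2 = 1
--     for p in range(1, k + 1):
--         pw2 = pw2 * 2 % MOD
--         cp = c[p] if p < len(c) else 0
--         res.append((fact[p] * cp - pw2 * S[p]) % MOD * INV2 % MOD)
--     return res
-- ===== Notes on version B (the rewrite author's own statement) =====
-- stated objective: alternative
-- what changed: B replaces A's O(k^2) per-p binomial convolutions by a single Karatsuba squaring of the EGF of the power sums (f[m]=S[m]/m! mod p, c=karat(f,f), answer_p=(p!*c[p]-2^p*S[p])/2), and computes the power sums by per-element geometric accumulation instead of per-exponent passes over a pow_a array.
import Mathlib
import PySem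

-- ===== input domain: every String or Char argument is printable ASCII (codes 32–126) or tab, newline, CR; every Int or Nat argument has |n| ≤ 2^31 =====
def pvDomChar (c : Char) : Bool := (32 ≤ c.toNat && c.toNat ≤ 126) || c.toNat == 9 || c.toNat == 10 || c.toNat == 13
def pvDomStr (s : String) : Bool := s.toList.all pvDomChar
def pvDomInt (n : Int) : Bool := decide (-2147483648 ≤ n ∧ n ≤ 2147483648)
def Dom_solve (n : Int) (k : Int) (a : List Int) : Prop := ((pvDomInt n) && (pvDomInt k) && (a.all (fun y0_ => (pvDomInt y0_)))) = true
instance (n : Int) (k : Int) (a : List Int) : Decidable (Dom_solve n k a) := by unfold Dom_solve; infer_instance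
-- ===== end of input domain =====

-- B (alternative): replaces A's per-p binomial convolutions by ONE Karatsuba squaring of the
-- EGF of the power sums (f[m]=S[m]/m!), with the power sums computed by per-element
-- geometric accumulation instead of per-exponent passes.

def pvM : Int := 998244353

-- hand port of Python's three-argument pow(b, e, m), exact for m > 0 and e >= 0
-- (the PySem library powMod computes b ^ e in full, infeasible for e near 10^9);
-- binary square-and-multiply, every intermediate reduced by emod = Python % for m > 0
def pyPow (b : Int) (e : Nat) (m : Int) : Int :=
  if h : e = 0 then 1 % m
  else
    let r := pyPow b (e / 2) m
    let r2 := r * r % m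
    if e % 2 = 1 then r2 * (b % m) % m else r2
termination_by e
decreasing_by exact Nat.div_lt_self (Nat.pos_of_ne_zero h) (by omega)

-- ===== PORT A =====
def solve (n : Int) (k : Int) (a : List Int) : List Int :=
  let S0 := PySem.List.pySetD (List.replicate (k+1).toNat (0:Int)) 0 (PySem.Int.mod n pvM)
  let pa0 := List.replicate n.toNat (1:Int)
  let Spa := (PySem.List.pyRange 1 (k+1) 1).foldl (fun (st : List Int × List Int) m =>
      let tp := (PySem.List.pyRange 0 n 1).foldl (fun (tp : Int × List Int) i =>
          let v := PySem.Int.mod (PySem.List.pyGetD tp.2 i 0 * PySem.List.pyGetD a i 0) pvM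
          (PySem.Int.mod (tp.1 + v) pvM, PySem.List.pySetD tp.2 i v)) ((0:Int), st.2)
      (PySem.List.pySetD st.1 m tp.1, tp.2)) (S0, pa0)
  let S := Spa.1
  let fact := (PySem.List.pyRange 1 (k+1) 1).foldl (fun f i =>
      PySem.List.pySetD f i (PySem.Int.mod (PySem.List.pyGetD f (i-1) 0 * i) pvM))
      (List.replicate (k+1).toNat (1:Int))
  let invf := (PySem.List.pyRange (k-1) (-1) (-1)).foldl (fun g i =>
      PySem.List.pySetD g i (PySem.Int.mod (PySem.List.pyGetD g (i+1) 0 * (i+1)) pvM))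
      (PySem.List.pySetD (List.replicate (k+1).toNat (1:Int)) k
        (pyPow (PySem.List.pyGetD fact k 0) (pvM-2).toNat pvM))
  let comb : Int → Int → Int := fun p m =>
      if m < 0 ∨ p < m then 0
      else PySem.Int.mod (PySem.Int.mod (PySem.List.pyGetD fact p 0 * PySem.List.pyGetD invf m 0) pvM
             * PySem.List.pyGetD invf (p-m) 0) pvM
  let pow2 := (PySem.List.pyRange 1 (k+1) 1).foldl (fun f i =>
      PySem.List.pySetD f i (PySem.Int.mod (PySem.List.pyGetD f (i-1) 0 * 2) pvM))
      (List.replicate (k+1).toNat (1:Int))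
  let inv2 := PySem.Int.floordiv (pvM + 1) 2
  (PySem.List.pyRange 1 (k+1) 1).foldl (fun res p =>
      let sb := (PySem.List.pyRange 0 (p+1) 1).foldl (fun sb m =>
          let v1 := PySem.Int.mod (comb p m * PySem.List.pyGetD S m 0) pvM
          let v2 := PySem.Int.mod (v1 * PySem.List.pyGetD S (p-m) 0) pvM
          PySem.Int.mod (sb + v2) pvM) (0:Int)
      let ss := PySem.Int.mod (PySem.List.pyGetD pow2 p 0 * PySem.List.pyGetD S p 0) pvM
      let tot := PySem.Int.mod (sb - ss) pvM
      res ++ [PySem.Int.mod (tot * inv2) pvM]) []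

-- ===== PORT B =====
-- padd: coefficient-wise sum built index by index over range(max(len f, len g))
def polyAdd (f g : List Int) : List Int :=
  (List.range (max f.length g.length)).map (fun i => f.getD i 0 + g.getD i 0)

def polySub (f g : List Int) : List Int := polyAdd f (g.map (fun y => -y))

theorem polyAdd_length (f g : List Int) : (polyAdd f g).length = max f.length g.length := by
  simp [polyAdd]

-- Karatsuba polynomial product over the integers (port of Source B's karat)
def karat (f g : List Int) : List Int :=
  if f.length ≤ 1 then g.map (fun x => f.headD 0 * x)
  else
    let h := f.length / 2
    let p0 := karat (f.take h) (g.take h)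
    let p2 := karat (f.drop h) (g.drop h)
    let pm := karat (polyAdd (f.take h) (f.drop h)) (polyAdd (g.take h) (g.drop h))
    let mid := polySub (polySub pm p0) p2
    polyAdd p0 (polyAdd (List.replicate h 0 ++ mid) (List.replicate (2*h) 0 ++ p2))
termination_by f.length
decreasing_by
  · simp only [List.length_take]; omega
  · simp only [List.length_drop]; omega
  · simp only [polyAdd_length, List.length_take, List.length_drop]; omega

-- power sums, transposed: one pass per element, accumulating its geometric powers column-wise
def bPowerSums (n : Int) (k : Int) (a : List Int) : List Int :=
  (PySem.List.pyRange 0 n 1).foldl (fun S i =>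
      ((PySem.List.pyRange 1 (k+1) 1).foldl (fun (tS : Int × List Int) m =>
          let t := PySem.Int.mod (tS.1 * PySem.List.pyGetD a i 0) pvM
          (t, PySem.List.pySetD tS.2 m (PySem.Int.mod (PySem.List.pyGetD tS.2 m 0 + t) pvM)))
        ((1:Int), S)).2)
    ([PySem.Int.mod n pvM] ++ List.replicate k.toNat (0:Int))

def bFact (k : Int) : List Int :=
  (PySem.List.pyRange 1 (k+1) 1).foldl (fun f i =>
      PySem.List.pySetD f i (PySem.Int.mod (PySem.List.pyGetD f (i-1) 0 * i) pvM))
    (List.replicate (k+1).toNat (1:Int))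

def bInvFact (k : Int) : List Int :=
  (PySem.List.pyRange (k-1) (-1) (-1)).foldl (fun g i =>
      PySem.List.pySetD g i (PySem.Int.mod (PySem.List.pyGetD g (i+1) 0 * (i+1)) pvM))
    (PySem.List.pySetD (List.replicate (k+1).toNat (1:Int)) k
      (pyPow (PySem.List.pyGetD (bFact k) k 0) (pvM-2).toNat pvM))

def bInv2 : Int := PySem.Int.floordiv (pvM + 1) 2

-- cp = c[p] if p < len(c) else 0
def bPget (c : List Int) (p : Int) : Int := if p < (c.length : Int) then c.getD p.toNat 0 else 0

def bResStep (c S fact : List Int) (st : List Int × Int) (p : Int) : List Int × Int :=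
  let pw2 := PySem.Int.mod (st.2 * 2) pvM
  (st.1 ++ [PySem.Int.mod (PySem.Int.mod (PySem.List.pyGetD fact p 0 * bPget c p
      - pw2 * PySem.List.pyGetD S p 0) pvM * bInv2) pvM], pw2)

def solve_alt (n : Int) (k : Int) (a : List Int) : List Int :=
  let S := bPowerSums n k a
  let fact := bFact k
  let invf := bInvFact k
  let f := (PySem.List.pyRange 0 (k+1) 1).map (fun m =>
      PySem.Int.mod (PySem.List.pyGetD S m 0 * PySem.List.pyGetD invf m 0) pvM)
  let c := karat f f
  ((PySem.List.pyRange 1 (k+1) 1).foldl (bResStep c S fact) ([], (1:Int))).1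

-- ===== PRECONDITION & SPEC =====
-- Pre_ excludes exactly the inputs on which A raises: k < 0 (IndexError on S[0]) and
-- k ≥ 1 with n > len(a) (IndexError on a[i]).
def Pre_solve (n : Int) (k : Int) (a : List Int) : Prop := 0 ≤ k ∧ (k = 0 ∨ n ≤ (a.length : Int))
instance (n : Int) (k : Int) (a : List Int) : Decidable (Pre_solve n k a) := by unfold Pre_solve; infer_instance
def pvWitness_solve : Int × Int × List Int := (3, 2, [1, 2, 5])
def Spec_solve (n : Int) (k : Int) (a : List Int) (out : List Int) : Prop := out = solve_alt n k a
instance (n : Int) (k : Int) (a : List Int) (out : List Int) : Decidable (Spec_solve n k a out) := by unfold Spec_solve; infer_instance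

-- ===== CLAIM (what is proved, stated in full; the proofs are below) =====
def Claim_equal_solve : Prop := ∀ (n : Int) (k : Int) (a : List Int), Dom_solve n k a → Pre_solve n k a → Spec_solve n k a (solve n k a)

-- ===== LEMMAS AND PROOFS =====

def pw (a : List Int) (i : Nat) : Nat → Int
  | 0 => 1
  | m+1 => pw a i m * a.getD i 0 % pvM
def stepAInner (a : List Int) (tp : Int × List Int) (i : Nat) : Int × List Int :=
  let v := tp.2.getD i 0 * a.getD i 0 % pvM
  ((tp.1 + v) % pvM, tp.2.set i v)

theorem A_inner_char (a : List Int) (nn : Nat) (m : Nat) :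
    ∀ (j : Nat), j ≤ nn → ∀ (t0 : Int) (pa : List Int), pa.length = nn →
      (∀ i, i < nn → pa.getD i 0 = pw a i m) →
      ((List.range j).foldl (stepAInner a) (t0, pa)).1
          = (List.range j).foldl (fun t i => (t + pw a i (m+1)) % pvM) t0
      ∧ ((List.range j).foldl (stepAInner a) (t0, pa)).2.length = nn
      ∧ (∀ i, i < nn → ((List.range j).foldl (stepAInner a) (t0, pa)).2.getD i 0
            = if i < j then pw a i (m+1) else pw a i m) := by
  intro j
  induction j with
  | zero =>
    intro _ t0 pa hlen hpa
    refine ⟨rfl, hlen, ?_⟩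
    intro i hi
    simpa using hpa i hi
  | succ j ih =>
    intro hj t0 pa hlen hpa
    have hj' : j ≤ nn := Nat.le_of_succ_le hj
    have hjn : j < nn := hj
    obtain ⟨h1, h2, h3⟩ := ih hj' t0 pa hlen hpa
    simp only [List.range_succ, List.foldl_append, List.foldl_cons, List.foldl_nil]
    set st := (List.range j).foldl (stepAInner a) (t0, pa) with hst
    have hread : st.2.getD j 0 = pw a j m := by
      rw [h3 j hjn]; simp
    have hv : st.2.getD j 0 * a.getD j 0 % pvM = pw a j (m+1) := by
      rw [hread]; rfl
    refine ⟨?_, ?_, ?_⟩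
    · simp only [stepAInner, hv, h1]
    · simp only [stepAInner, List.length_set, h2]
    · intro i hi
      simp only [stepAInner]
      by_cases hij : i = j
      · subst hij
        rw [List.getD_eq_getElem?_getD, List.getElem?_set_self (by omega), Option.getD_some, hv]
        simp
      · rw [List.getD_eq_getElem?_getD, List.getElem?_set_ne (by omega), ← List.getD_eq_getElem?_getD, h3 i hi]
        rcases Nat.lt_or_ge i j with h | h
        · simp [h, Nat.lt_succ_of_lt h]
        · have : ¬ i < j := by omega
          have : ¬ i < j + 1 := by omega
          simp [*]

def sAcc (a : List Int) (nn : Nat) (m : Nat) : Int :=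
  (List.range nn).foldl (fun t i => (t + pw a i m) % pvM) 0
def sVal (n : Int) (a : List Int) (nn : Nat) (m : Nat) : Int :=
  if m = 0 then n % pvM else sAcc a nn m

def pw2v : Nat → Int
  | 0 => 1
  | j+1 => pw2v j * 2 % pvM

def stepAOuter (a : List Int) (nn : Nat) (st : List Int × List Int) (j : Nat) : List Int × List Int :=
  let tp := (List.range nn).foldl (stepAInner a) (0, st.2)
  (st.1.set (j+1) tp.1, tp.2)

theorem A_S_char (n : Int) (a : List Int) (nn kn : Nat) :
    ∀ (j : Nat), j ≤ kn →
      ((List.range j).foldl (stepAOuter a nn) ((n % pvM) :: List.replicate kn 0, List.replicate nn 1)).1.length = kn + 1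
      ∧ (∀ m, m ≤ kn → ((List.range j).foldl (stepAOuter a nn) ((n % pvM) :: List.replicate kn 0, List.replicate nn 1)).1.getD m 0
            = if m = 0 then n % pvM else if m ≤ j then sAcc a nn m else 0)
      ∧ ((List.range j).foldl (stepAOuter a nn) ((n % pvM) :: List.replicate kn 0, List.replicate nn 1)).2.length = nn
      ∧ (∀ i, i < nn → ((List.range j).foldl (stepAOuter a nn) ((n % pvM) :: List.replicate kn 0, List.replicate nn 1)).2.getD i 0 = pw a i j) := by
  intro j
  induction j with
  | zero =>
    intro _
    refine ⟨by simp, ?_, by simp, ?_⟩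
    · intro m hm
      rcases Nat.eq_zero_or_pos m with h | h
      · subst h; simp
      · have hm0 : ¬ m = 0 := by omega
        have : ¬ m ≤ 0 := by omega
        simp only [List.range_zero, List.foldl_nil, this, hm0, if_false]
        rcases m with _ | m'
        · omega
        · simp only [List.range_zero, List.foldl_nil, List.getD_eq_getElem?_getD, List.getElem?_cons_succ, List.getElem?_replicate]
          split <;> rfl
    · intro i hi
      simp [List.getD_eq_getElem?_getD, List.getElem?_replicate, hi, pw]
  | succ j ih =>
    intro hj
    have hj' : j ≤ kn := Nat.le_of_succ_le hj
    obtain ⟨h1, h2, h3, h4⟩ := ih hj'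
    simp only [List.range_succ, List.foldl_append, List.foldl_cons, List.foldl_nil]
    set st := (List.range j).foldl (stepAOuter a nn) ((n % pvM) :: List.replicate kn 0, List.replicate nn 1) with hst
    obtain ⟨g1, g2, g3⟩ := A_inner_char a nn j nn (le_refl nn) 0 st.2 h3 h4
    refine ⟨?_, ?_, ?_, ?_⟩
    · simp only [stepAOuter, List.length_set, h1]
    · intro m hm
      simp only [stepAOuter]
      by_cases hmj : m = j + 1
      · subst hmj
        rw [List.getD_eq_getElem?_getD, List.getElem?_set_self (by omega), Option.getD_some, g1]
        simp [sAcc]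
      · rw [List.getD_eq_getElem?_getD, List.getElem?_set_ne (by omega), ← List.getD_eq_getElem?_getD, h2 m hm]
        by_cases hm0 : m = 0
        · simp [hm0]
        · by_cases hmle : m ≤ j
          · simp [hm0, hmle, Nat.le_succ_of_le hmle]
          · have : ¬ m ≤ j + 1 := by omega
            simp [hm0, hmle, this]
    · simp only [stepAOuter, g2]
    · intro i hi
      simp only [stepAOuter]
      rw [g3 i hi]
      simp [hi]

def stepBInner (a : List Int) (i : Nat) (tS : Int × List Int) (j : Nat) : Int × List Int :=
  let t := tS.1 * a.getD i 0 % pvM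
  (t, tS.2.set (j+1) ((tS.2.getD (j+1) 0 + t) % pvM))
def stepBOuter (a : List Int) (kn : Nat) (S : List Int) (i : Nat) : List Int :=
  ((List.range kn).foldl (stepBInner a i) (1, S)).2

theorem B_inner_char (a : List Int) (i : Nat) :
    ∀ (j : Nat) (S : List Int), j < S.length →
      ((List.range j).foldl (stepBInner a i) (1, S)).1 = pw a i j
      ∧ ((List.range j).foldl (stepBInner a i) (1, S)).2.length = S.length
      ∧ (∀ m, ((List.range j).foldl (stepBInner a i) (1, S)).2.getD m 0
            = if 1 ≤ m ∧ m ≤ j then (S.getD m 0 + pw a i m) % pvM else S.getD m 0) := by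
  intro j
  induction j with
  | zero =>
    intro S _
    refine ⟨rfl, rfl, ?_⟩
    intro m
    have : ¬ (1 ≤ m ∧ m ≤ 0) := by omega
    rw [if_neg this]; simp
  | succ j ih =>
    intro S hj
    have hj' : j < S.length := by omega
    obtain ⟨h1, h2, h3⟩ := ih S hj'
    simp only [List.range_succ, List.foldl_append, List.foldl_cons, List.foldl_nil]
    set st := (List.range j).foldl (stepBInner a i) (1, S) with hst
    have ht : st.1 * a.getD i 0 % pvM = pw a i (j+1) := by rw [h1]; rfl
    have hread : st.2.getD (j+1) 0 = S.getD (j+1) 0 := by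
      rw [h3 (j+1)]; simp
    refine ⟨?_, ?_, ?_⟩
    · simp only [stepBInner, ht]
    · simp only [stepBInner, List.length_set, h2]
    · intro m
      simp only [stepBInner, ht]
      by_cases hm : m = j + 1
      · subst hm
        rw [List.getD_eq_getElem?_getD, List.getElem?_set_self (by omega), Option.getD_some, hread]
        have : 1 ≤ j+1 ∧ j+1 ≤ j+1 := by omega
        simp [this]
      · rw [List.getD_eq_getElem?_getD, List.getElem?_set_ne (by omega), ← List.getD_eq_getElem?_getD, h3 m]
        by_cases hc : 1 ≤ m ∧ m ≤ j
        · have : 1 ≤ m ∧ m ≤ j + 1 := by omega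
          simp [hc, this]
        · have : ¬ (1 ≤ m ∧ m ≤ j + 1) := by omega
          simp [hc, this]

theorem B_S_char (n : Int) (a : List Int) (kn : Nat) :
    ∀ (j : Nat),
      ((List.range j).foldl (stepBOuter a kn) ((n % pvM) :: List.replicate kn 0)).length = kn + 1
      ∧ (∀ m, m ≤ kn → ((List.range j).foldl (stepBOuter a kn) ((n % pvM) :: List.replicate kn 0)).getD m 0
            = if m = 0 then n % pvM
              else (List.range j).foldl (fun t i => (t + pw a i m) % pvM) 0) := by
  intro j
  induction j with
  | zero =>
    refine ⟨by simp, ?_⟩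
    intro m hm
    rcases m with _ | m'
    · simp
    · have : ¬ (m' + 1 = 0) := by omega
      simp only [List.range_zero, List.foldl_nil, this, if_false, List.getD_eq_getElem?_getD,
        List.getElem?_cons_succ, List.getElem?_replicate]
      split <;> rfl
  | succ j ih =>
    obtain ⟨h1, h2⟩ := ih
    simp only [List.range_succ, List.foldl_append, List.foldl_cons, List.foldl_nil]
    set st := (List.range j).foldl (stepBOuter a kn) ((n % pvM) :: List.replicate kn 0) with hst
    obtain ⟨g1, g2, g3⟩ := B_inner_char a j kn st (by rw [h1]; omega)
    refine ⟨?_, ?_⟩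
    · simp only [stepBOuter, g2, h1]
    · intro m hm
      simp only [stepBOuter]
      rw [g3 m]
      by_cases hm0 : m = 0
      · subst hm0
        have : ¬ (1 ≤ 0 ∧ 0 ≤ kn) := by omega
        simp only [this, if_false]
        rw [h2 0 (by omega)]; simp
      · have hc : 1 ≤ m ∧ m ≤ kn := by omega
        simp only [hc, and_self, if_true]
        rw [h2 m hm]
        simp only [hm0, if_false]

theorem pvM_pos : (0:Int) < pvM := by decide
theorem mod_pvM (x : Int) : PySem.Int.mod x pvM = x % pvM := PySem.Int.mod_eq_emod_of_pos pvM_pos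

theorem pyRange_from_one (k : Int) :
    PySem.List.pyRange 1 (k+1) 1 = (List.range k.toNat).map (fun j : Nat => (1:Int) + (j:Int)) := by
  have h : k + 1 - 1 = k := by ring
  rw [PySem.List.pyRange_one, h]

theorem pyRange_from_zero (n : Int) :
    PySem.List.pyRange 0 n 1 = (List.range n.toNat).map (fun i : Nat => (i : Int)) := by
  rw [PySem.List.pyRange_one]
  norm_num

theorem bridge_SA (n k : Int) (a : List Int) (hk : 0 ≤ k) :
    ((PySem.List.pyRange 1 (k+1) 1).foldl (fun (st : List Int × List Int) m =>
      let tp := (PySem.List.pyRange 0 n 1).foldl (fun (tp : Int × List Int) i =>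
          let v := PySem.Int.mod (PySem.List.pyGetD tp.2 i 0 * PySem.List.pyGetD a i 0) pvM
          (PySem.Int.mod (tp.1 + v) pvM, PySem.List.pySetD tp.2 i v)) ((0:Int), st.2)
      (PySem.List.pySetD st.1 m tp.1, tp.2))
      (PySem.List.pySetD (List.replicate (k+1).toNat (0:Int)) 0 (PySem.Int.mod n pvM), List.replicate n.toNat (1:Int)))
    = (List.range k.toNat).foldl (stepAOuter a n.toNat)
        ((n % pvM) :: List.replicate k.toNat 0, List.replicate n.toNat 1) := by
  have hinit : PySem.List.pySetD (List.replicate (k+1).toNat (0:Int)) 0 (PySem.Int.mod n pvM)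
      = (n % pvM) :: List.replicate k.toNat 0 := by
    have h1 : (k+1).toNat = k.toNat + 1 := by omega
    rw [h1, List.replicate_succ, mod_pvM, PySem.List.pySetD_of_nonneg]
    · rfl
    · omega
  rw [pyRange_from_one k, List.foldl_map, hinit]
  congr 1
  funext st j
  rw [pyRange_from_zero n, List.foldl_map]
  have hcast : (1:Int) + (j:Int) = ((j+1 : Nat) : Int) := by push_cast; ring
  simp only [PySem.List.pyGetD_natCast, PySem.List.pySetD_natCast, mod_pvM, hcast]
  rfl

theorem bridge_SB (n k : Int) (a : List Int) :
    bPowerSums n k a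
    = (List.range n.toNat).foldl (stepBOuter a k.toNat) ((n % pvM) :: List.replicate k.toNat 0) := by
  unfold bPowerSums
  rw [pyRange_from_zero n, List.foldl_map]
  have hinit : [PySem.Int.mod n pvM] ++ List.replicate k.toNat (0:Int)
      = (n % pvM) :: List.replicate k.toNat 0 := by
    rw [mod_pvM]; rfl
  rw [hinit]
  congr 1
  funext S i
  rw [pyRange_from_one k, List.foldl_map]
  have hcast : ∀ j : Nat, (1:Int) + (j:Int) = ((j+1 : Nat) : Int) := by intro j; push_cast; ring
  simp only [PySem.List.pyGetD_natCast, PySem.List.pySetD_natCast, mod_pvM, hcast]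
  rfl

def sMap (n : Int) (k : Int) (a : List Int) : List Int :=
  (List.range (k.toNat+1)).map (sVal n a n.toNat)

theorem list_eq_map (l : List Int) (K : Nat) (f : Nat → Int) (hlen : l.length = K)
    (hget : ∀ m, m < K → l.getD m 0 = f m) : l = (List.range K).map f := by
  apply List.ext_getElem (by simp [hlen])
  intro i h1 h2
  have := hget i (by omega)
  rw [List.getD_eq_getElem l 0 (by omega)] at this
  simp [this]

theorem SA_final (n k : Int) (a : List Int) :
    ((List.range k.toNat).foldl (stepAOuter a n.toNat)
        ((n % pvM) :: List.replicate k.toNat 0, List.replicate n.toNat 1)).1 = sMap n k a := by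
  obtain ⟨h1, h2, _, _⟩ := A_S_char n a n.toNat k.toNat k.toNat (le_refl _)
  apply list_eq_map _ _ _ h1
  intro m hm
  rw [h2 m (by omega)]
  unfold sVal
  by_cases hm0 : m = 0
  · simp [hm0]
  · have : m ≤ k.toNat := by omega
    simp [hm0, this]

theorem SB_final (n k : Int) (a : List Int) :
    (List.range n.toNat).foldl (stepBOuter a k.toNat) ((n % pvM) :: List.replicate k.toNat 0)
      = sMap n k a := by
  obtain ⟨h1, h2⟩ := B_S_char n a k.toNat n.toNat
  apply list_eq_map _ _ _ h1
  intro m hm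
  rw [h2 m (by omega)]
  unfold sVal sAcc
  rfl

-- powers of two: table characterisation
theorem pow2_inv (K : Nat) :
    ∀ (j : Nat), j ≤ K →
      ((List.range j).foldl (fun (f : List Int) (jj : Nat) => f.set (jj+1) (f.getD jj 0 * 2 % pvM)) (List.replicate (K+1) 1)).length = K + 1
      ∧ (∀ m, m ≤ K → ((List.range j).foldl (fun (f : List Int) (jj : Nat) => f.set (jj+1) (f.getD jj 0 * 2 % pvM)) (List.replicate (K+1) 1)).getD m 0
            = if m ≤ j then pw2v m else 1) := by
  intro j
  induction j with
  | zero =>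
    intro _
    refine ⟨by simp, ?_⟩
    intro m hm
    rcases m with _ | m'
    · simp [pw2v]
    · have : ¬ (m' + 1 ≤ 0) := by omega
      have hlt : m' + 1 < K + 1 := by omega
      simp only [List.range_zero, List.foldl_nil, this, if_false, List.getD_eq_getElem?_getD,
        List.getElem?_replicate, hlt, if_true, Option.getD_some]
  | succ j ih =>
    intro hj
    obtain ⟨h1, h2⟩ := ih (by omega)
    simp only [List.range_succ, List.foldl_append, List.foldl_cons, List.foldl_nil]
    set st := (List.range j).foldl (fun (f : List Int) (jj : Nat) => f.set (jj+1) (f.getD jj 0 * 2 % pvM)) (List.replicate (K+1) 1) with hst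
    have hread : st.getD j 0 = pw2v j := by rw [h2 j (by omega)]; simp
    refine ⟨by simp [h1], ?_⟩
    intro m hm
    by_cases hmj : m = j + 1
    · subst hmj
      rw [List.getD_eq_getElem?_getD, List.getElem?_set_self (by omega), Option.getD_some, hread]
      simp [pw2v]
    · rw [List.getD_eq_getElem?_getD, List.getElem?_set_ne (by omega), ← List.getD_eq_getElem?_getD, h2 m hm]
      by_cases hle : m ≤ j
      · simp [hle, Nat.le_succ_of_le hle]
      · have : ¬ (m ≤ j + 1) := by omega
        simp [hle, this]

theorem pow2_char (k : Int) (hk : 0 ≤ k) :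
    (PySem.List.pyRange 1 (k+1) 1).foldl (fun f i =>
      PySem.List.pySetD f i (PySem.Int.mod (PySem.List.pyGetD f (i-1) 0 * 2) pvM))
      (List.replicate (k+1).toNat (1:Int))
    = (List.range (k.toNat+1)).map pw2v := by
  rw [pyRange_from_one k, List.foldl_map]
  have hK : (k+1).toNat = k.toNat + 1 := by omega
  rw [hK]
  have hfun : (fun (f : List Int) (j : Nat) =>
      PySem.List.pySetD f (1+(j:Int)) (PySem.Int.mod (PySem.List.pyGetD f ((1+(j:Int))-1) 0 * 2) pvM))
      = (fun (f : List Int) (jj : Nat) => f.set (jj+1) (f.getD jj 0 * 2 % pvM)) := by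
    funext f j
    have hc1 : (1:Int) + (j:Int) = ((j+1 : Nat) : Int) := by push_cast; ring
    have hc2 : (1:Int) + (j:Int) - 1 = ((j : Nat) : Int) := by push_cast; ring
    rw [hc2, hc1, PySem.List.pyGetD_natCast, PySem.List.pySetD_natCast, mod_pvM]
  rw [hfun]
  obtain ⟨h1, h2⟩ := pow2_inv k.toNat k.toNat (le_refl _)
  apply list_eq_map _ _ _ h1
  intro m hm
  rw [h2 m (by omega)]
  simp [Nat.lt_succ_iff.mp hm]

theorem foldl_addmod {α : Type} (t : α → Int) :
    ∀ (l : List α) (s : Int), s % pvM = s →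
      l.foldl (fun s m => (s + t m) % pvM) s = (s + (l.map t).sum) % pvM := by
  intro l
  induction l with
  | nil => intro s hs; simpa using hs.symm
  | cons x l ih =>
    intro s hs
    simp only [List.foldl_cons, List.map_cons, List.sum_cons]
    have hmm : ∀ x : Int, x % pvM % pvM = x % pvM := fun x => Int.emod_emod_of_dvd x dvd_rfl
    rw [ih ((s + t x) % pvM) (hmm _)]
    rw [Int.add_emod ((s + t x) % pvM), hmm, ← Int.add_emod, add_assoc]

-- ----- Karatsuba correctness via Polynomial ℤ -----

noncomputable def toPoly : List Int → Polynomial ℤ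
  | [] => 0
  | x :: l => Polynomial.C x + Polynomial.X * toPoly l

theorem coeff_toPoly : ∀ (l : List Int) (n : Nat), (toPoly l).coeff n = l.getD n 0 := by
  intro l
  induction l with
  | nil => intro n; simp [toPoly]
  | cons x l ih =>
    intro n
    rcases n with _ | n
    · simp [toPoly, Polynomial.mul_coeff_zero]
    · rw [show toPoly (x::l) = Polynomial.C x + Polynomial.X * toPoly l from rfl,
        Polynomial.coeff_add, Polynomial.coeff_X_mul, ih, Polynomial.coeff_C]
      simp

theorem getD_polyAdd (f g : List Int) (n : Nat) :
    (polyAdd f g).getD n 0 = f.getD n 0 + g.getD n 0 := by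
  unfold polyAdd
  by_cases h : n < max f.length g.length
  · rw [PySem.List.getD_map_range _ _ _ _ h]
  · have h1 : f.length ≤ n := by omega
    have h2 : g.length ≤ n := by omega
    rw [List.getD_eq_default _ _ (by simpa using h), List.getD_eq_default _ _ h1,
      List.getD_eq_default _ _ h2]
    simp

theorem toPoly_polyAdd (f g : List Int) : toPoly (polyAdd f g) = toPoly f + toPoly g := by
  apply Polynomial.ext
  intro n
  rw [coeff_toPoly, getD_polyAdd, Polynomial.coeff_add, coeff_toPoly, coeff_toPoly]

theorem getD_map_neg (g : List Int) (n : Nat) :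
    (g.map (fun y => -y)).getD n 0 = -(g.getD n 0) := by
  simp only [List.getD_eq_getElem?_getD, List.getElem?_map]
  cases g[n]? <;> simp

theorem toPoly_polySub (f g : List Int) : toPoly (polySub f g) = toPoly f - toPoly g := by
  unfold polySub
  rw [toPoly_polyAdd]
  have : toPoly (g.map (fun y => -y)) = -toPoly g := by
    apply Polynomial.ext
    intro n
    rw [coeff_toPoly, getD_map_neg, Polynomial.coeff_neg, coeff_toPoly]
  rw [this]; ring

theorem toPoly_shift (h : Nat) (p : List Int) :
    toPoly (List.replicate h 0 ++ p) = Polynomial.X ^ h * toPoly p := by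
  induction h with
  | zero => simp
  | succ h ih =>
    rw [List.replicate_succ, List.cons_append]
    show Polynomial.C 0 + Polynomial.X * toPoly (List.replicate h 0 ++ p) = _
    rw [ih, pow_succ, map_zero]
    ring

theorem toPoly_take_drop (h : Nat) :
    ∀ (f : List Int), toPoly f = toPoly (f.take h) + Polynomial.X ^ h * toPoly (f.drop h) := by
  induction h with
  | zero => intro f; simp [toPoly]
  | succ h ih =>
    intro f
    cases f with
    | nil => simp [toPoly]
    | cons x f =>
      rw [List.take_succ_cons, List.drop_succ_cons]
      show Polynomial.C x + Polynomial.X * toPoly f = _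
      rw [ih f]
      show _ = Polynomial.C x + Polynomial.X * toPoly (f.take h) + Polynomial.X ^ (h+1) * toPoly (f.drop h)
      rw [pow_succ]
      ring

theorem toPoly_map_mul (c : Int) (g : List Int) :
    toPoly (g.map (fun x => c * x)) = Polynomial.C c * toPoly g := by
  induction g with
  | nil => simp [toPoly]
  | cons x g ih =>
    show Polynomial.C (c * x) + Polynomial.X * toPoly (g.map (fun x => c * x)) = _
    rw [ih, map_mul]
    show _ = Polynomial.C c * (Polynomial.C x + Polynomial.X * toPoly g)
    ring

theorem toPoly_short (f : List Int) (h : f.length ≤ 1) : toPoly f = Polynomial.C (f.headD 0) := by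
  match f with
  | [] => simp [toPoly]
  | [x] => simp [toPoly]
  | x :: y :: l => simp at h

theorem toPoly_karat (f g : List Int) : toPoly (karat f g) = toPoly f * toPoly g := by
  fun_induction karat f g with
  | case1 f g hf =>
    rw [toPoly_map_mul, toPoly_short f hf]
  | case2 f g hf h p0 p2 pm mid ih1 ih2 ih3 =>
    rw [toPoly_polyAdd, toPoly_polyAdd, toPoly_shift, toPoly_shift]
    show toPoly p0 + (Polynomial.X ^ h * toPoly mid + Polynomial.X ^ (2*h) * toPoly p2) = _
    have hmid : toPoly mid = toPoly pm - toPoly p0 - toPoly p2 := by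
      show toPoly (polySub (polySub pm p0) p2) = _
      rw [toPoly_polySub, toPoly_polySub]
    rw [hmid, ih1, ih2, ih3, toPoly_polyAdd, toPoly_polyAdd]
    rw [toPoly_take_drop h f, toPoly_take_drop h g]
    ring

theorem sum_map_range_int (F : Nat → Int) (n : Nat) :
    ((List.range n).map F).sum = ∑ i ∈ Finset.range n, F i := by
  induction n with
  | zero => simp
  | succ n ih => rw [List.range_succ, List.map_append, List.sum_append, Finset.sum_range_succ, ih]; simp

theorem karat_sq_getD (f : List Int) (p : Nat) :
    (karat f f).getD p 0 = ∑ m ∈ Finset.range (p+1), f.getD m 0 * f.getD (p - m) 0 := by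
  rw [← coeff_toPoly, toPoly_karat, Polynomial.coeff_mul,
    Finset.Nat.sum_antidiagonal_eq_sum_range_succ_mk]
  simp [coeff_toPoly]

theorem cast_mod_pvM (x : Int) : ((x % pvM : Int) : ZMod 998244353) = (x : ZMod 998244353) := by
  have h : pvM = ((998244353 : Nat) : Int) := by norm_num [pvM]
  rw [h, ZMod.intCast_mod]

theorem eq_emod_of_cast {x y : Int}
    (h : (x : ZMod 998244353) = (y : ZMod 998244353)) : x % pvM = y % pvM := by
  have h2 := (ZMod.intCast_eq_intCast_iff x y 998244353).mp h
  have h3 : ((998244353 : Nat) : Int) = pvM := by norm_num [pvM]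
  unfold Int.ModEq at h2
  rwa [h3] at h2

theorem bPget_eq (c : List Int) (p : Int) (hp : 0 ≤ p) : bPget c p = c.getD p.toNat 0 := by
  unfold bPget
  split
  · rfl
  · rw [List.getD_eq_default _ _ (by omega)]

theorem B_res_fold (c S fact : List Int) :
    ∀ (t : Nat),
      (List.range t).foldl (fun (st : List Int × Int) (j : Nat) => bResStep c S fact st (1+(j:Int))) ([], (1:Int))
      = ((List.range t).map (fun (j : Nat) =>
          PySem.Int.mod (PySem.Int.mod (PySem.List.pyGetD fact (1+(j:Int)) 0 * bPget c (1+(j:Int))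
              - pw2v (j+1) * PySem.List.pyGetD S (1+(j:Int)) 0) pvM * bInv2) pvM),
         pw2v t) := by
  intro t
  induction t with
  | zero => simp [pw2v]
  | succ t ih =>
    simp only [List.range_succ, List.foldl_append, List.foldl_cons, List.foldl_nil, ih]
    unfold bResStep
    have hpw : pw2v t * 2 % pvM = pw2v (t+1) := rfl
    simp only [mod_pvM, hpw, List.map_append, List.map_cons, List.map_nil]

theorem per_p (S fact invf : List Int) (k p : Int) (hp1 : 1 ≤ p) (hpk : p ≤ k) (w : Int) :
    ((PySem.List.pyRange 0 (p+1) 1).foldl (fun sb m =>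
        (sb + (if m < 0 ∨ p < m then 0 else
            PySem.List.pyGetD fact p 0 * PySem.List.pyGetD invf m 0 % pvM * PySem.List.pyGetD invf (p-m) 0 % pvM)
          * PySem.List.pyGetD S m 0 % pvM * PySem.List.pyGetD S (p-m) 0 % pvM) % pvM) 0
      - w * PySem.List.pyGetD S p 0 % pvM) % pvM
    = (PySem.List.pyGetD fact p 0
        * bPget (karat ((PySem.List.pyRange 0 (k+1) 1).map (fun m =>
            PySem.List.pyGetD S m 0 * PySem.List.pyGetD invf m 0 % pvM))
          ((PySem.List.pyRange 0 (k+1) 1).map (fun m =>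
            PySem.List.pyGetD S m 0 * PySem.List.pyGetD invf m 0 % pvM))) p
      - w * PySem.List.pyGetD S p 0) % pvM := by
  set f := (PySem.List.pyRange 0 (k+1) 1).map (fun m =>
      PySem.List.pyGetD S m 0 * PySem.List.pyGetD invf m 0 % pvM) with hf
  have hfget : ∀ j : Nat, j < k.toNat + 1 →
      f.getD j 0 = PySem.List.pyGetD S (j:Int) 0 * PySem.List.pyGetD invf (j:Int) 0 % pvM := by
    intro j hj
    have hcast : (k:Int)+1 = ((k.toNat+1 : Nat) : Int) := by omega
    rw [hf, hcast, ← PySem.List.pyGetD_natCast, PySem.List.pyGetD_map_pyRange _ _ _ _ hj]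
  have hN : ((p:Int)+1).toNat = p.toNat + 1 := by omega
  rw [bPget_eq _ _ (by omega), karat_sq_getD]
  rw [pyRange_from_zero (p+1), List.foldl_map, foldl_addmod _ _ 0 (by decide), hN,
    sum_map_range_int]
  apply eq_emod_of_cast
  push_cast [cast_mod_pvM]
  congr 1
  rw [zero_add, Finset.mul_sum]
  apply Finset.sum_congr rfl
  intro m hm
  have hm' : m < p.toNat + 1 := Finset.mem_range.mp hm
  have hif : ¬ ((m:Int) < 0 ∨ p < (m:Int)) := by omega
  rw [if_neg hif]
  have hsub : ((p.toNat - m : Nat) : Int) = p - (m:Int) := by omega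
  rw [hfget m (by omega), hfget (p.toNat - m) (by omega), hsub]
  push_cast [cast_mod_pvM]
  ring

-- ===== VERDICT (by name: the statement is the Claim_ definition above) =====
theorem solve_eq (n k : Int) (a : List Int) (hk : 0 ≤ k) : solve n k a = solve_alt n k a := by
  unfold solve solve_alt
  dsimp only
  rw [bridge_SA n k a hk, SA_final, bridge_SB, SB_final, pow2_char k hk]
  unfold bInvFact bFact
  simp only [pyRange_from_one k, List.foldl_map]
  rw [PySem.List.foldl_append_singleton_eq_map, B_res_fold]
  unfold bInv2
  dsimp only
  simp only [List.nil_append, mod_pvM]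
  apply List.map_congr_left
  intro j hj
  rw [List.mem_range] at hj
  have hc1 : (1:Int) + (j:Int) = ((j+1 : Nat) : Int) := by push_cast; ring
  have hpow : PySem.List.pyGetD ((List.range (k.toNat+1)).map pw2v) (1+(j:Int)) 0 = pw2v (j+1) := by
    rw [hc1, PySem.List.pyGetD_natCast, List.getD_eq_getElem?_getD, List.getElem?_map,
        List.getElem?_range (by omega)]
    rfl
  rw [hpow]
  rw [per_p _ _ _ k (1+(j:Int)) (by omega) (by omega) (pw2v (j+1))]

theorem solve_spec : Claim_equal_solve := by
  unfold Claim_equal_solve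
  intro n k a hdom hpre
  unfold Spec_solve
  exact solve_eq n k a hpre.1
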